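-- pv_equiv track=rewrite | github.com/Leryk1981/mdf-cutting | packer/packing.py | hybrid_sort
-- ===== SOURCE A (Python) =====
-- def hybrid_sort(rectangles):
--     """Сортировка деталей для HybridMaxRects - сначала большие, потом средние, потом мелкие."""
--     large, medium, small = [], [], []
--     for w, h, idx in rectangles:
--         if w > 2000:
--             large.append((w, h, idx))
--         elif w < 800:
--             small.append((w, h, idx))
--         else:
--             medium.append((w, h, idx))
--     return (sorted(large, key=lambda x: -(x[0] * x[1])) +
--             sorted(medium, key=lambda x: -(x[0] * x[1])) +
--             sorted(small, key=lambda x: (-x[0], -x[1])))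
-- ===== SOURCE B (Python) =====
-- def hybrid_sort(rectangles):
--     """One stable sort with a composite key instead of a three-way partition
--     followed by three separately sorted buckets."""
--     def key(rect):
--         w, h, idx = rect
--         if w > 2000:
--             return (0, -(w * h), 0)
--         if w < 800:
--             return (2, -w, -h)
--         return (1, -(w * h), 0)
--     return sorted(rectangles, key=key)
-- ===== Notes on version B (the rewrite author's own statement) =====
-- stated objective: simpler
-- what changed: A partitions the rectangles into three width buckets with an explicit loop and concatenates three separately keyed sorts; B does one stable sort of the whole list with a composite (rank, secondary, tertiary) key, relying on sort stability to reproduce each bucket's tie order.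
import Mathlib
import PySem

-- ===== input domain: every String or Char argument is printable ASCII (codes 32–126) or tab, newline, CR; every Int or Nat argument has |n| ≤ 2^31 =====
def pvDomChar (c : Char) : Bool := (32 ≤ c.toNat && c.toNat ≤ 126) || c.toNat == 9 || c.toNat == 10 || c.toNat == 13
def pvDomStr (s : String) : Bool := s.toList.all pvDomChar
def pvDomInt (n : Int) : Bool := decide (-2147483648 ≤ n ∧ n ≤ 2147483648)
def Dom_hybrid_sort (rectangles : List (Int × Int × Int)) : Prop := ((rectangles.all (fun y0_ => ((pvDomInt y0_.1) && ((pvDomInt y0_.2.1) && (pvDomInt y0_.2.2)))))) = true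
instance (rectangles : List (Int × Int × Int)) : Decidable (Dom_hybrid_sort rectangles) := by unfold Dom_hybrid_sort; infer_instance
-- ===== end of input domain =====

-- B replaces A's three-way partition plus three concatenated bucket sorts by ONE stable sort
-- with a composite (rank, secondary, tertiary) key — simpler: one pass, one key function.

-- ===== PORT A =====
-- the partition loop's body: append the rectangle to large / small / medium
def pvStepA (acc : List (Int × Int × Int) × List (Int × Int × Int) × List (Int × Int × Int))
    (r : Int × Int × Int) :
    List (Int × Int × Int) × List (Int × Int × Int) × List (Int × Int × Int) :=
  if r.1 > 2000 then (acc.1 ++ [r], acc.2.1, acc.2.2)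
  else if r.1 < 800 then (acc.1, acc.2.1, acc.2.2 ++ [r])
  else (acc.1, acc.2.1 ++ [r], acc.2.2)

def hybrid_sort (rectangles : List (Int × Int × Int)) : List (Int × Int × Int) :=
  let acc := rectangles.foldl pvStepA ([], [], [])
  PySem.List.sorted acc.1 (fun x => -(x.1 * x.2.1)) ++
  PySem.List.sorted acc.2.1 (fun x => -(x.1 * x.2.1)) ++
  PySem.List.sorted2 acc.2.2 (fun x => -x.1) (fun x => -x.2.1)

-- ===== PORT B =====
-- B's key function: (rank, secondary, tertiary) int triple
def pvKeyB (r : Int × Int × Int) : Int × Int × Int :=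
  if r.1 > 2000 then (0, -(r.1 * r.2.1), 0)
  else if r.1 < 800 then (2, -r.1, -r.2.1)
  else (1, -(r.1 * r.2.1), 0)

-- Python's `<` on int triples, written out (lexicographic)
def pvTupleLt (a b : Int × Int × Int) : Bool :=
  decide (a.1 < b.1) ||
    (decide (a.1 = b.1) &&
      (decide (a.2.1 < b.2.1) || (decide (a.2.1 = b.2.1) && decide (a.2.2 < b.2.2))))

def pvBfB (a b : Int × Int × Int) : Bool := pvTupleLt (pvKeyB a) (pvKeyB b)

-- sorted(rectangles, key=key) with a 3-tuple key: PySem.List.sorted covers single keys and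
-- sorted2 covers pairs, so the 3-tuple case is ported by hand as the SAME stable insertion
-- sort (foldl insertBy) with Python's lexicographic comparison of int triples — exact.
def hybrid_sort_alt (rectangles : List (Int × Int × Int)) : List (Int × Int × Int) :=
  rectangles.foldl (fun acc r => PySem.List.insertBy pvBfB r acc) []

-- ===== PRECONDITION & SPEC =====
def Spec_hybrid_sort (rectangles : List (Int × Int × Int)) (out : List (Int × Int × Int)) : Prop := out = hybrid_sort_alt rectangles
instance (rectangles : List (Int × Int × Int)) (out : List (Int × Int × Int)) : Decidable (Spec_hybrid_sort rectangles out) := by unfold Spec_hybrid_sort; infer_instance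

-- ===== CLAIM (what is proved, stated in full; the proofs are below) =====
def Claim_equal_hybrid_sort : Prop := ∀ (rectangles : List (Int × Int × Int)), Dom_hybrid_sort rectangles → Spec_hybrid_sort rectangles (hybrid_sort rectangles)

-- ===== LEMMAS AND PROOFS =====

-- a generic stable insertion sort (what both ports' sorts unfold to)
def pvIS {α : Type} (bf : α → α → Bool) (xs : List α) : List α :=
  xs.foldl (fun acc x => PySem.List.insertBy bf x acc) []

-- position tagging (proof device: makes the comparison used by the canonical form total)
def pvTag : Nat → List (Int × Int × Int) → List ((Int × Int × Int) × Nat)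
  | _, [] => []
  | n, x :: xs => (x, n) :: pvTag (n + 1) xs

-- the canonical comparison: B's comparison with input position as final tiebreak
def pvCT (a b : (Int × Int × Int) × Nat) : Bool :=
  pvBfB a.1 b.1 || (!(pvBfB b.1 a.1) && decide (a.2 < b.2))

-- bucket predicates, in A's testing order
def pvP0 (r : Int × Int × Int) : Bool := decide (2000 < r.1)
def pvP1 (r : Int × Int × Int) : Bool := !decide (2000 < r.1) && !decide (r.1 < 800)
def pvP2 (r : Int × Int × Int) : Bool := !decide (2000 < r.1) && decide (r.1 < 800)

-- A's two bucket comparisons (exactly what sorted / sorted2 compare with)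
def pvCArea (a b : Int × Int × Int) : Bool := decide (-(a.1 * a.2.1) < -(b.1 * b.2.1))
def pvC2 (a b : Int × Int × Int) : Bool :=
  decide (-a.1 < -b.1) || (!decide (-b.1 < -a.1) && decide (-a.2.1 < -b.2.1))

-- ---- generic insertBy facts ----
theorem pv_insertBy_nil {α : Type} (bf : α → α → Bool) (x : α) :
    PySem.List.insertBy bf x [] = [x] := rfl

theorem pv_insertBy_cons {α : Type} (bf : α → α → Bool) (x e : α) (t : List α) :
    PySem.List.insertBy bf x (e :: t)
      = if bf x e then x :: e :: t else e :: PySem.List.insertBy bf x t := rfl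

theorem pv_insertBy_congr {α : Type} (bf bf' : α → α → Bool) (x : α) (l : List α)
    (h : ∀ e ∈ l, bf x e = bf' x e) :
    PySem.List.insertBy bf x l = PySem.List.insertBy bf' x l := by
  induction l with
  | nil => rfl
  | cons e t ih =>
    have he := h e (by simp)
    rw [pv_insertBy_cons, pv_insertBy_cons, he,
      ih (fun y hy => h y (by simp [hy]))]

theorem pv_insertBy_map {α β : Type} (c : β → β → Bool) (f : α → β) (x : α) (l : List α) :
    (PySem.List.insertBy (fun a b => c (f a) (f b)) x l).map f
      = PySem.List.insertBy c (f x) (l.map f) := by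
  induction l with
  | nil => rfl
  | cons e t ih =>
    rw [pv_insertBy_cons, List.map_cons, pv_insertBy_cons]
    by_cases hb : c (f x) (f e)
    · simp [hb]
    · simp [hb, ih]

theorem pv_insertBy_skip {α : Type} (bf : α → α → Bool) (x : α) (l1 l2 : List α)
    (h : ∀ e ∈ l1, bf x e = false) :
    PySem.List.insertBy bf x (l1 ++ l2) = l1 ++ PySem.List.insertBy bf x l2 := by
  induction l1 with
  | nil => rfl
  | cons e t ih =>
    have he := h e (by simp)
    rw [List.cons_append, pv_insertBy_cons, he]
    simp only [Bool.false_eq_true, if_false]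
    rw [ih (fun y hy => h y (by simp [hy])), List.cons_append]

theorem pv_insertBy_enter {α : Type} (bf : α → α → Bool) (x : α) (l1 l2 : List α)
    (h : ∀ e ∈ l2, bf x e = true) :
    PySem.List.insertBy bf x (l1 ++ l2) = PySem.List.insertBy bf x l1 ++ l2 := by
  induction l1 with
  | nil =>
    cases l2 with
    | nil => rfl
    | cons e t =>
      have he := h e (by simp)
      simp [pv_insertBy_cons, pv_insertBy_nil, he]
  | cons e t ih =>
    rw [List.cons_append, pv_insertBy_cons, pv_insertBy_cons]
    by_cases hb : bf x e
    · simp [hb]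
    · simp [hb, ih]

theorem pv_mem_foldl_ins {α : Type} (bf : α → α → Bool) :
    ∀ (ys acc : List α) (y : α),
      y ∈ ys.foldl (fun acc x => PySem.List.insertBy bf x acc) acc → y ∈ acc ∨ y ∈ ys := by
  intro ys
  induction ys with
  | nil => intro acc y h; exact Or.inl h
  | cons z t ih =>
    intro acc y h
    rcases ih _ y h with h' | h'
    · have : y = z ∨ y ∈ acc := by simpa [PySem.List.mem_insertBy] using h'
      rcases this with h'' | h''
      · exact Or.inr (by simp [h''])
      · exact Or.inl h''
    · exact Or.inr (by simp [h'])

theorem pv_mem_pvIS {α : Type} (bf : α → α → Bool) (xs : List α) (y : α)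
    (h : y ∈ pvIS bf xs) : y ∈ xs := by
  rcases pv_mem_foldl_ins bf xs [] y h with h' | h'
  · cases h'
  · exact h' 

-- ---- tag facts ----
theorem pvTag_append (xs ys : List (Int × Int × Int)) :
    ∀ n, pvTag n (xs ++ ys) = pvTag n xs ++ pvTag (n + xs.length) ys := by
  induction xs with
  | nil => intro n; simp [pvTag]
  | cons x t ih =>
    intro n
    simp only [List.cons_append, pvTag, ih (n + 1), List.length_cons]
    have : n + 1 + t.length = n + (t.length + 1) := by omega
    rw [this]

theorem pvTag_map_fst (xs : List (Int × Int × Int)) :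
    ∀ n, (pvTag n xs).map Prod.fst = xs := by
  induction xs with
  | nil => intro n; rfl
  | cons x t ih => intro n; simp [pvTag, ih]

theorem pvTag_lb (xs : List (Int × Int × Int)) :
    ∀ n, ∀ e ∈ pvTag n xs, n ≤ e.2 := by
  induction xs with
  | nil => intro n e he; cases he
  | cons x t ih =>
    intro n e he
    rcases List.mem_cons.1 he with he | he
    · simp [he]
    · have := ih (n + 1) e he; omega

theorem pvTag_pairwise (xs : List (Int × Int × Int)) :
    ∀ n, (pvTag n xs).Pairwise (fun a b => a.2 < b.2) := by
  induction xs with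
  | nil => intro n; exact List.Pairwise.nil
  | cons x t ih =>
    intro n
    refine List.Pairwise.cons ?_ (ih (n + 1))
    intro e he
    have := pvTag_lb t (n + 1) e he
    simpa using by omega

-- ---- untagging a position-tagged stable sort (cT = c with position tiebreak) ----
theorem pvIS_tag_aux (cT : ((Int × Int × Int) × Nat) → ((Int × Int × Int) × Nat) → Bool)
    (c : (Int × Int × Int) → (Int × Int × Int) → Bool) (S : List ((Int × Int × Int) × Nat))
    (hct : ∀ a ∈ S, ∀ b ∈ S, cT a b = (c a.1 b.1 || (!(c b.1 a.1) && decide (a.2 < b.2)))) :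
    ∀ (ys acc : List ((Int × Int × Int) × Nat)),
      (∀ y ∈ ys, y ∈ S) → (∀ e ∈ acc, e ∈ S) →
      (∀ e ∈ acc, ∀ y ∈ ys, e.2 < y.2) → ys.Pairwise (fun a b => a.2 < b.2) →
      (ys.foldl (fun acc x => PySem.List.insertBy cT x acc) acc).map Prod.fst
        = (ys.map Prod.fst).foldl (fun acc x => PySem.List.insertBy c x acc) (acc.map Prod.fst) := by
  intro ys
  induction ys with
  | nil => intro acc _ _ _ _; rfl
  | cons y t ih =>
    intro acc hys hacc hord hp
    have hyS : y ∈ S := hys y (by simp)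
    have hins : PySem.List.insertBy cT y acc
        = PySem.List.insertBy (fun a b => c a.1 b.1) y acc := by
      apply pv_insertBy_congr
      intro e he
      have hy2 : e.2 < y.2 := hord e he y (by simp)
      rw [hct y hyS e (hacc e he)]
      have : decide (y.2 < e.2) = false := by simp; omega
      simp [this]
    simp only [List.foldl_cons, List.map_cons]
    rw [ih (PySem.List.insertBy cT y acc)
        (fun z hz => hys z (by simp [hz]))
        (fun e he => by
          have : e = y ∨ e ∈ acc := by simpa [PySem.List.mem_insertBy] using he
          rcases this with h | h
          · exact h ▸ hyS
          · exact hacc e h)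
        (fun e he z hz => by
          have : e = y ∨ e ∈ acc := by simpa [PySem.List.mem_insertBy] using he
          rcases this with h | h
          · subst h; exact (List.pairwise_cons.1 hp).1 z hz
          · exact hord e h z (by simp [hz]))
        (List.pairwise_cons.1 hp).2]
    rw [hins, pv_insertBy_map]

theorem pvIS_tag (cT : ((Int × Int × Int) × Nat) → ((Int × Int × Int) × Nat) → Bool)
    (c : (Int × Int × Int) → (Int × Int × Int) → Bool) (ys : List ((Int × Int × Int) × Nat))
    (hct : ∀ a ∈ ys, ∀ b ∈ ys, cT a b = (c a.1 b.1 || (!(c b.1 a.1) && decide (a.2 < b.2))))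
    (hp : ys.Pairwise (fun a b => a.2 < b.2)) :
    (pvIS cT ys).map Prod.fst = pvIS c (ys.map Prod.fst) := by
  have := pvIS_tag_aux cT c ys hct ys [] (fun _ h => h) (by intro e he; cases he)
    (by intro e he; cases he) hp
  simpa [pvIS] using this

-- ---- the partition loop is three filters ----
theorem pvStepA_foldl (xs : List (Int × Int × Int)) :
    ∀ l m s, xs.foldl pvStepA (l, m, s)
      = (l ++ xs.filter pvP0, m ++ xs.filter pvP1, s ++ xs.filter pvP2) := by
  induction xs with
  | nil => intro l m s; simp
  | cons x t ih =>
    intro l m s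
    simp only [List.foldl_cons, pvStepA]
    by_cases h1 : x.1 > 2000
    · simp only [if_pos h1, ih, List.filter_cons, pvP0, pvP1, pvP2, h1]
      simp [h1, List.append_assoc, List.singleton_append]
    · by_cases h2 : x.1 < 800
      · simp only [if_neg h1, if_pos h2, ih, List.filter_cons, pvP0, pvP1, pvP2]
        simp [h1, h2, List.append_assoc, List.singleton_append]
      · simp only [if_neg h1, if_neg h2, ih, List.filter_cons, pvP0, pvP1, pvP2]
        simp [h1, h2, List.append_assoc, List.singleton_append]

-- ---- comparison identities on the buckets ----
theorem pvCT_bucket0 (a b : (Int × Int × Int) × Nat)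
    (ha : 2000 < a.1.1) (hb : 2000 < b.1.1) :
    pvCT a b = (pvCArea a.1 b.1 || (!(pvCArea b.1 a.1) && decide (a.2 < b.2))) := by
  simp only [pvCT, pvBfB, pvKeyB, pvTupleLt, pvCArea, if_pos ha, if_pos hb]
  generalize -(a.1.1 * a.1.2.1) = pa
  generalize -(b.1.1 * b.1.2.1) = pb
  rw [Bool.eq_iff_iff]
  simp only [Bool.or_eq_true, Bool.and_eq_true, Bool.not_eq_true', Bool.not_eq_false', decide_eq_true_eq, Bool.or_eq_false_iff, Bool.and_eq_false_iff,
    decide_eq_false_iff_not]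
  simp only [lt_irrefl, not_true, not_false_eq_true, true_and, and_true, and_false, false_and,
    false_or, or_false, or_true, true_or]

theorem pvCT_bucket1 (a b : (Int × Int × Int) × Nat)
    (ha : ¬ 2000 < a.1.1) (ha' : ¬ a.1.1 < 800) (hb : ¬ 2000 < b.1.1) (hb' : ¬ b.1.1 < 800) :
    pvCT a b = (pvCArea a.1 b.1 || (!(pvCArea b.1 a.1) && decide (a.2 < b.2))) := by
  simp only [pvCT, pvBfB, pvKeyB, pvTupleLt, pvCArea, if_neg ha, if_neg ha', if_neg hb,
    if_neg hb']
  generalize -(a.1.1 * a.1.2.1) = pa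
  generalize -(b.1.1 * b.1.2.1) = pb
  rw [Bool.eq_iff_iff]
  simp only [Bool.or_eq_true, Bool.and_eq_true, Bool.not_eq_true', Bool.not_eq_false', decide_eq_true_eq, Bool.or_eq_false_iff, Bool.and_eq_false_iff,
    decide_eq_false_iff_not]
  simp only [lt_irrefl, not_true, not_false_eq_true, true_and, and_true, and_false, false_and,
    false_or, or_false, or_true, true_or]

theorem pvCT_bucket2 (a b : (Int × Int × Int) × Nat)
    (ha : ¬ 2000 < a.1.1) (ha' : a.1.1 < 800) (hb : ¬ 2000 < b.1.1) (hb' : b.1.1 < 800) :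
    pvCT a b = (pvC2 a.1 b.1 || (!(pvC2 b.1 a.1) && decide (a.2 < b.2))) := by
  simp only [pvCT, pvBfB, pvKeyB, pvTupleLt, pvC2, if_neg ha, if_pos ha', if_neg hb,
    if_pos hb']
  rw [Bool.eq_iff_iff]
  simp only [Bool.or_eq_true, Bool.and_eq_true, Bool.not_eq_true', Bool.not_eq_false', decide_eq_true_eq, Bool.or_eq_false_iff, Bool.and_eq_false_iff,
    decide_eq_false_iff_not]
  simp only [lt_irrefl, not_true, not_false_eq_true, true_and, and_true, and_false, false_and,
    false_or, or_false, or_true, true_or]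
  omega

-- rank of the first key component
def pvRank (r : Int × Int × Int) : Int :=
  if r.1 > 2000 then 0 else if r.1 < 800 then 2 else 1

theorem pvCT_lower_rank (x e : (Int × Int × Int) × Nat) (h : pvRank e.1 < pvRank x.1) :
    pvCT x e = false := by
  unfold pvRank at h
  simp only [pvCT, pvBfB, pvKeyB, pvTupleLt]
  split_ifs at h ⊢ <;> first
    | omega
    | (rw [Bool.eq_iff_iff]
       simp only [Bool.or_eq_true, Bool.and_eq_true, Bool.not_eq_true', Bool.not_eq_false', decide_eq_true_eq, Bool.or_eq_false_iff, Bool.and_eq_false_iff,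
         decide_eq_false_iff_not, Bool.false_eq_true, iff_false]
       try simp only [lt_irrefl, not_true, not_false_eq_true, true_and, and_true, and_false, false_and,
    false_or, or_false, or_true, true_or]
       omega)

theorem pvCT_higher_rank (x e : (Int × Int × Int) × Nat) (h : pvRank x.1 < pvRank e.1) :
    pvCT x e = true := by
  unfold pvRank at h
  simp only [pvCT, pvBfB, pvKeyB, pvTupleLt]
  split_ifs at h ⊢ <;> first
    | omega
    | (rw [Bool.eq_iff_iff]
       simp only [Bool.or_eq_true, Bool.and_eq_true, Bool.not_eq_true', Bool.not_eq_false', decide_eq_true_eq, Bool.or_eq_false_iff, Bool.and_eq_false_iff,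
         decide_eq_false_iff_not, Bool.true_eq, iff_true]
       try simp only [lt_irrefl, not_true, not_false_eq_true, true_and, and_true, and_false, false_and,
    false_or, or_false, or_true, true_or]
       omega)

theorem pvRank_p0 (r : Int × Int × Int) (h : pvP0 r = true) : pvRank r = 0 := by
  simp only [pvP0, decide_eq_true_eq] at h; simp [pvRank, h]

theorem pvRank_p1 (r : Int × Int × Int) (h : pvP1 r = true) : pvRank r = 1 := by
  simp only [pvP1, Bool.and_eq_true, Bool.not_eq_true', decide_eq_false_iff_not] at h
  simp [pvRank, h.1, h.2]

theorem pvRank_p2 (r : Int × Int × Int) (h : pvP2 r = true) : pvRank r = 2 := by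
  simp only [pvP2, Bool.and_eq_true, Bool.not_eq_true', decide_eq_false_iff_not,
    decide_eq_true_eq] at h
  simp [pvRank, h.1, h.2]

-- ---- the canonical tagged sort splits into the three tagged buckets ----
def pvF (p : (Int × Int × Int) → Bool) (xs : List (Int × Int × Int)) :
    List ((Int × Int × Int) × Nat) :=
  (pvTag 0 xs).filter (fun e => p e.1)

-- membership in a sorted tagged bucket determines the bucket predicate
theorem pv_mem_bucket (p : (Int × Int × Int) → Bool) (xs : List (Int × Int × Int))
    (e : (Int × Int × Int) × Nat) (h : e ∈ pvIS pvCT (pvF p xs)) : p e.1 = true := by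
  have := pv_mem_pvIS pvCT (pvF p xs) e h
  exact (List.mem_filter.1 this).2

theorem pvT1 (xs : List (Int × Int × Int)) :
    pvIS pvCT (pvTag 0 xs)
      = pvIS pvCT (pvF pvP0 xs) ++ pvIS pvCT (pvF pvP1 xs) ++ pvIS pvCT (pvF pvP2 xs) := by
  induction xs using List.reverseRecOn with
  | nil => rfl
  | append_singleton xs x ih =>
    have htag : pvTag 0 (xs ++ [x]) = pvTag 0 xs ++ [(x, xs.length)] := by
      rw [pvTag_append]; simp [pvTag]
    have hF : ∀ p : (Int × Int × Int) → Bool,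
        pvF p (xs ++ [x]) = pvF p xs ++ (if p x then [(x, xs.length)] else []) := by
      intro p; unfold pvF; rw [htag, List.filter_append]
      by_cases hp : p x <;> simp [hp]
    have hL : pvIS pvCT (pvTag 0 (xs ++ [x]))
        = PySem.List.insertBy pvCT (x, xs.length) (pvIS pvCT (pvTag 0 xs)) := by
      unfold pvIS; rw [htag, List.foldl_append]; rfl
    have hIns : ∀ (l : List ((Int × Int × Int) × Nat)),
        pvIS pvCT (l ++ [(x, xs.length)])
          = PySem.List.insertBy pvCT (x, xs.length) (pvIS pvCT l) := by
      intro l; unfold pvIS; rw [List.foldl_append]; rfl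
    rw [hL, ih]
    by_cases h1 : x.1 > 2000
    · have hp0 : pvP0 x = true := by simp [pvP0]; omega
      have hp1 : pvP1 x = false := by simp [pvP1]; omega
      have hp2 : pvP2 x = false := by simp [pvP2]; omega
      rw [hF pvP0, hF pvP1, hF pvP2, hp0, hp1, hp2]
      simp only [if_true, if_false, hIns]
      rw [List.append_assoc,
        pv_insertBy_enter pvCT (x, xs.length) _ _ (by
          intro e he
          rcases List.mem_append.1 he with he | he
          · exact pvCT_higher_rank _ _ (by
              rw [pvRank_p1 e.1 (pv_mem_bucket pvP1 xs e he)]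
              simp [pvRank, h1])
          · exact pvCT_higher_rank _ _ (by
              rw [pvRank_p2 e.1 (pv_mem_bucket pvP2 xs e he)]
              simp [pvRank, h1]))]
      simp [List.append_assoc]
    · by_cases h2 : x.1 < 800
      · have hp0 : pvP0 x = false := by simp [pvP0]; omega
        have hp1 : pvP1 x = false := by simp [pvP1]; omega
        have hp2 : pvP2 x = true := by simp [pvP2]; constructor <;> omega
        rw [hF pvP0, hF pvP1, hF pvP2, hp0, hp1, hp2]
        simp only [if_true, if_false, hIns]
        rw [pv_insertBy_skip pvCT (x, xs.length) _ _ (by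
          intro e he
          rcases List.mem_append.1 he with he | he
          · exact pvCT_lower_rank _ _ (by
              rw [pvRank_p0 e.1 (pv_mem_bucket pvP0 xs e he)]
              simp [pvRank, h1, h2])
          · exact pvCT_lower_rank _ _ (by
              rw [pvRank_p1 e.1 (pv_mem_bucket pvP1 xs e he)]
              simp [pvRank, h1, h2]))]
        simp [List.append_assoc]
      · have hp0 : pvP0 x = false := by simp [pvP0]; omega
        have hp1 : pvP1 x = true := by simp [pvP1]; constructor <;> omega
        have hp2 : pvP2 x = false := by simp [pvP2]; omega
        rw [hF pvP0, hF pvP1, hF pvP2, hp0, hp1, hp2]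
        simp only [if_true, if_false, hIns]
        rw [List.append_assoc,
          pv_insertBy_skip pvCT (x, xs.length) _ _ (by
            intro e he
            exact pvCT_lower_rank _ _ (by
              rw [pvRank_p0 e.1 (pv_mem_bucket pvP0 xs e he)]
              simp [pvRank, h1, h2])),
          pv_insertBy_enter pvCT (x, xs.length) _ _ (by
            intro e he
            exact pvCT_higher_rank _ _ (by
              rw [pvRank_p2 e.1 (pv_mem_bucket pvP2 xs e he)]
              simp [pvRank, h1, h2]))]
        simp [List.append_assoc]

theorem pv_map_fst_filter (p : (Int × Int × Int) → Bool) (xs : List (Int × Int × Int)) :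
    ∀ n, ((pvTag n xs).filter (fun e => p e.1)).map Prod.fst = xs.filter p := by
  induction xs with
  | nil => intro n; rfl
  | cons x t ih =>
    intro n
    simp only [pvTag, List.filter_cons]
    by_cases hp : p x
    · simp [hp, ih]
    · simp [hp, ih]

-- ===== VERDICT (by name: the statement is the Claim_ definition above) =====
theorem hybrid_sort_spec : Claim_equal_hybrid_sort := by
  intro xs _
  unfold Spec_hybrid_sort
  show hybrid_sort xs = hybrid_sort_alt xs
  have hsorted : ∀ l : List (Int × Int × Int),
      PySem.List.sorted l (fun x => -(x.1 * x.2.1)) = pvIS pvCArea l := fun l => rfl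
  have hsorted2 : ∀ l : List (Int × Int × Int),
      PySem.List.sorted2 l (fun x => -x.1) (fun x => -x.2.1) = pvIS pvC2 l := fun l => rfl
  have hpart := pvStepA_foldl xs [] [] []
  have hpw : ∀ p : (Int × Int × Int) → Bool,
      ((pvTag 0 xs).filter (fun e => p e.1)).Pairwise (fun a b => a.2 < b.2) :=
    fun p => (pvTag_pairwise xs 0).sublist List.filter_sublist
  have e0 : pvIS pvCArea (xs.filter pvP0) = (pvIS pvCT (pvF pvP0 xs)).map Prod.fst := by
    rw [← pv_map_fst_filter pvP0 xs 0]
    refine (pvIS_tag pvCT pvCArea _ ?_ (hpw pvP0)).symm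
    intro a ha b hb
    have ha' : 2000 < a.1.1 := by
      have := (List.mem_filter.1 ha).2; simpa [pvP0] using this
    have hb' : 2000 < b.1.1 := by
      have := (List.mem_filter.1 hb).2; simpa [pvP0] using this
    exact pvCT_bucket0 a b ha' hb'
  have e1 : pvIS pvCArea (xs.filter pvP1) = (pvIS pvCT (pvF pvP1 xs)).map Prod.fst := by
    rw [← pv_map_fst_filter pvP1 xs 0]
    refine (pvIS_tag pvCT pvCArea _ ?_ (hpw pvP1)).symm
    intro a ha b hb
    have ha' := (List.mem_filter.1 ha).2
    have hb' := (List.mem_filter.1 hb).2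
    simp only [pvP1, Bool.and_eq_true, Bool.not_eq_true', decide_eq_false_iff_not] at ha' hb'
    exact pvCT_bucket1 a b ha'.1 ha'.2 hb'.1 hb'.2
  have e2 : pvIS pvC2 (xs.filter pvP2) = (pvIS pvCT (pvF pvP2 xs)).map Prod.fst := by
    rw [← pv_map_fst_filter pvP2 xs 0]
    refine (pvIS_tag pvCT pvC2 _ ?_ (hpw pvP2)).symm
    intro a ha b hb
    have ha' := (List.mem_filter.1 ha).2
    have hb' := (List.mem_filter.1 hb).2
    simp only [pvP2, Bool.and_eq_true, Bool.not_eq_true', decide_eq_false_iff_not,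
      decide_eq_true_eq] at ha' hb'
    exact pvCT_bucket2 a b ha'.1 ha'.2 hb'.1 hb'.2
  calc hybrid_sort xs
      = pvIS pvCArea (xs.filter pvP0) ++ pvIS pvCArea (xs.filter pvP1)
          ++ pvIS pvC2 (xs.filter pvP2) := by
        unfold hybrid_sort
        rw [hpart]
        simp only [List.nil_append]
        rw [hsorted, hsorted, hsorted2]
    _ = (pvIS pvCT (pvF pvP0 xs)).map Prod.fst ++ (pvIS pvCT (pvF pvP1 xs)).map Prod.fst
          ++ (pvIS pvCT (pvF pvP2 xs)).map Prod.fst := by rw [e0, e1, e2]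
    _ = (pvIS pvCT (pvF pvP0 xs) ++ pvIS pvCT (pvF pvP1 xs)
          ++ pvIS pvCT (pvF pvP2 xs)).map Prod.fst := by
        rw [List.map_append, List.map_append]
    _ = (pvIS pvCT (pvTag 0 xs)).map Prod.fst := by rw [← pvT1]
    _ = pvIS pvBfB ((pvTag 0 xs).map Prod.fst) :=
        pvIS_tag pvCT pvBfB (pvTag 0 xs) (fun a _ b _ => rfl) (pvTag_pairwise xs 0)
    _ = pvIS pvBfB xs := by rw [pvTag_map_fst]
    _ = hybrid_sort_alt xs := rfl
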